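-- pv_equiv track=rewrite | github.com/stefanomorni/PMS-3.1 | scripts/vba_sync_watch.py | strip_metadata
-- ===== SOURCE A (Python) =====
-- def strip_metadata(lines):
--     """Strip VBE headers and embedded Attribute lines."""
--     clean = []
--     in_begin = False
--     header_done = False
--
--     for line in lines:
--         stripped = line.strip()
--
--         # Always skip Attribute lines (prevents syntax errors in AddFromString)
--         if stripped.startswith("Attribute "):
--             continue
--
--         if not header_done:
--             if stripped.startswith("VERSION ") or stripped.startswith("BEGIN"):
--                 if stripped.startswith("BEGIN"):
--                     in_begin = True
--                 continue
--             if in_begin: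
--                 if stripped == "END":
--                     in_begin = False
--                 continue
--             if stripped:
--                 header_done = True
--             else:
--                 continue
--
--         if header_done:
--             clean.append(line)
--
--     return "".join(clean).strip()
-- ===== SOURCE B (Python) =====
-- def _skip_block(ls):
--     """Consume lines up to and including the first 'END' line; return the rest."""
--     if not ls:
--         return []
--     if ls[0].strip() == "END":
--         return ls[1:]
--     return _skip_block(ls[1:])
--
--
-- def _drop_header(ls):
--     """Recursive-descent: consume VERSION lines, BEGIN..END blocks and blanks;
--     return the remaining lines starting at the first real content line."""
--     if not ls:
--         return []
--     s = ls[0].strip()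
--     if s.startswith("VERSION "):
--         return _drop_header(ls[1:])
--     if s.startswith("BEGIN"):
--         return _drop_header(_skip_block(ls[1:]))
--     if not s:
--         return _drop_header(ls[1:])
--     return ls
--
--
-- def strip_metadata(lines):
--     """Strip VBE headers and embedded Attribute lines."""
--     body = _drop_header([l for l in lines if not l.strip().startswith("Attribute ")])
--     return "".join(body).strip()
-- ===== Notes on version B (the rewrite author's own statement) =====
-- stated objective: alternative
-- what changed: A's single fused loop with in_begin/header_done boolean state flags is replaced by a recursive-descent parser: a filter pass removes Attribute lines, then two mutually calling recursive functions consume the header grammar (VERSION lines, BEGIN..END blocks as a sub-routine, blanks) and return the remaining suffix, which is joined and stripped; no state flags at all.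
import Mathlib
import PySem

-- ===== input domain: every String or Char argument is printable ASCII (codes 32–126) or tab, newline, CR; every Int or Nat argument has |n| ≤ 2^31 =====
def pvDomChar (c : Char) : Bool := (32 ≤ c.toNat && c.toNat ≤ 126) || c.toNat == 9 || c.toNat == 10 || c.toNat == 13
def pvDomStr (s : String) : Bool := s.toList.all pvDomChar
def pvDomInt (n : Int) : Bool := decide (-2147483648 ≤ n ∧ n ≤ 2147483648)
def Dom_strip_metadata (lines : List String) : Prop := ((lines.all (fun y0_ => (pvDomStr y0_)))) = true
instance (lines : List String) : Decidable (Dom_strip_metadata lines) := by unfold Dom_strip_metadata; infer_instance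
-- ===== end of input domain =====

-- B replaces A's fused loop with boolean state flags by a recursive-descent header parser
-- (filter Attribute lines, then consume the header grammar recursively and join the suffix);
-- alternative decomposition, same cost.

-- ===== PORT A =====
-- state = (clean, in_begin, header_done); one step of A's loop body
def aStep (st : List String × Bool × Bool) (line : String) : List String × Bool × Bool :=
  let clean := st.1
  let in_begin := st.2.1
  let header_done := st.2.2
  let stripped := PySem.Str.strip line
  if PySem.Str.startswith stripped "Attribute " then st
  else if header_done = false then
    if PySem.Str.startswith stripped "VERSION " || PySem.Str.startswith stripped "BEGIN" then
      (clean, (if PySem.Str.startswith stripped "BEGIN" then true else in_begin), header_done)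
    else if in_begin then
      (if stripped = "END" then (clean, false, header_done) else st)
    else if stripped ≠ "" then (clean ++ [line], in_begin, true)
    else st
  else (clean ++ [line], in_begin, header_done)

def strip_metadata (lines : List String) : String :=
  PySem.Str.strip (PySem.Str.join "" (lines.foldl aStep ([], false, false)).1)

-- ===== PORT B =====
def altIsAttr (l : String) : Bool := PySem.Str.startswith (PySem.Str.strip l) "Attribute "

-- consume lines up to and including the first 'END' line; return the rest
def altSkipBlock : List String → List String
  | [] => []
  | l :: rest => if PySem.Str.strip l = "END" then rest else altSkipBlock rest

-- termination helper for altDropHeader (cited by name in decreasing_by)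
theorem altSkipBlock_length_le (ls : List String) : (altSkipBlock ls).length ≤ ls.length := by
  induction ls with
  | nil => simp [altSkipBlock]
  | cons l rest ih =>
    simp only [altSkipBlock]
    split
    · simp
    · exact Nat.le_trans ih (Nat.le_succ _)

-- recursive descent: consume VERSION lines, BEGIN..END blocks and blanks; return the rest
def altDropHeader : List String → List String
  | [] => []
  | l :: rest =>
    let s := PySem.Str.strip l
    if PySem.Str.startswith s "VERSION " then altDropHeader rest
    else if PySem.Str.startswith s "BEGIN" then altDropHeader (altSkipBlock rest)
    else if s = "" then altDropHeader rest
    else l :: rest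
termination_by ls => ls.length
decreasing_by
  all_goals have := altSkipBlock_length_le rest
  all_goals simp
  all_goals omega

def strip_metadata_alt (lines : List String) : String :=
  let body := altDropHeader (lines.filter (fun l => !altIsAttr l))
  PySem.Str.strip (PySem.Str.join "" body)

-- ===== PRECONDITION & SPEC =====
def Spec_strip_metadata (lines : List String) (out : String) : Prop := out = strip_metadata_alt lines
instance (lines : List String) (out : String) : Decidable (Spec_strip_metadata lines out) := by unfold Spec_strip_metadata; infer_instance

-- ===== CLAIM (what is proved, stated in full; the proofs are below) =====
def Claim_equal_strip_metadata : Prop := ∀ (lines : List String), Dom_strip_metadata lines → Spec_strip_metadata lines (strip_metadata lines)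

-- ===== LEMMAS AND PROOFS =====

-- "VERSION " and "BEGIN" prefixes are mutually exclusive (different first character)
theorem startswith_V_not_B (s : String)
    (h : PySem.Str.startswith s "VERSION " = true) :
    PySem.Str.startswith s "BEGIN" = false := by
  simp only [PySem.Str.startswith_eq] at h ⊢
  obtain ⟨t, ht⟩ := (PySem.Chars.startswith_iff _ _).mp h
  cases hb : PySem.Chars.startswith s.toList "BEGIN".toList with
  | false => rfl
  | true =>
    obtain ⟨u, hu⟩ := (PySem.Chars.startswith_iff _ _).mp hb
    rw [← ht] at hu
    simp at hu

theorem startswith_B_not_V (s : String)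
    (h : PySem.Str.startswith s "BEGIN" = true) :
    PySem.Str.startswith s "VERSION " = false := by
  simp only [PySem.Str.startswith_eq] at h ⊢
  obtain ⟨t, ht⟩ := (PySem.Chars.startswith_iff _ _).mp h
  cases hb : PySem.Chars.startswith s.toList "VERSION ".toList with
  | false => rfl
  | true =>
    obtain ⟨u, hu⟩ := (PySem.Chars.startswith_iff _ _).mp hb
    rw [← ht] at hu
    simp at hu

theorem filter_cons_attr (l : String) (ls : List String)
    (h : PySem.Str.startswith (PySem.Str.strip l) "Attribute " = true) :
    (l :: ls).filter (fun x => !altIsAttr x) = ls.filter (fun x => !altIsAttr x) := by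
  rw [List.filter_cons]
  have hb : (!altIsAttr l) = false := by unfold altIsAttr; rw [h]; rfl
  simp only [hb, Bool.false_eq_true, if_false]

theorem filter_cons_nonattr (l : String) (ls : List String)
    (h : ¬ PySem.Str.startswith (PySem.Str.strip l) "Attribute " = true) :
    (l :: ls).filter (fun x => !altIsAttr x) = l :: ls.filter (fun x => !altIsAttr x) := by
  rw [List.filter_cons]
  have hb : (!altIsAttr l) = true := by
    unfold altIsAttr; rw [Bool.eq_false_iff.mpr h]; rfl
  simp only [hb, if_true]

-- once header_done is true, A just appends every non-Attribute line
theorem aStep_done (lines : List String) : ∀ (clean : List String) (ib : Bool),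
    (lines.foldl aStep (clean, ib, true)).1 = clean ++ lines.filter (fun x => !altIsAttr x) := by
  induction lines with
  | nil => intro clean ib; simp
  | cons l ls ih =>
    intro clean ib
    simp only [List.foldl_cons]
    by_cases h : PySem.Str.startswith (PySem.Str.strip l) "Attribute " = true
    · have hstep : aStep (clean, ib, true) l = (clean, ib, true) := by
        simp only [aStep, h, if_true]
      rw [hstep, filter_cons_attr l ls h, ih]
    · have hstep : aStep (clean, ib, true) l = (clean ++ [l], ib, true) := by
        simp only [aStep, Bool.eq_false_iff.mpr h, Bool.false_eq_true, if_false,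
          Bool.true_eq_false]
      rw [hstep, filter_cons_nonattr l ls h, ih]
      simp

-- main invariant, both flag values at once: A's accumulated clean equals clean ++ the
-- suffix B's recursive-descent parser returns (after the Attribute filter)
theorem aStep_main (lines : List String) : ∀ (clean : List String),
    (lines.foldl aStep (clean, false, false)).1 =
      clean ++ altDropHeader (lines.filter (fun x => !altIsAttr x)) ∧
    (lines.foldl aStep (clean, true, false)).1 =
      clean ++ altDropHeader (altSkipBlock (lines.filter (fun x => !altIsAttr x))) := by
  induction lines with
  | nil => intro clean; simp [altDropHeader, altSkipBlock]
  | cons l ls ih =>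
    intro clean
    simp only [List.foldl_cons]
    by_cases hA : PySem.Str.startswith (PySem.Str.strip l) "Attribute " = true
    · have h0 : aStep (clean, false, false) l = (clean, false, false) := by
        simp only [aStep, hA, if_true]
      have h1 : aStep (clean, true, false) l = (clean, true, false) := by
        simp only [aStep, hA, if_true]
      rw [h0, h1, filter_cons_attr l ls hA]
      exact ih clean
    · have hA' := Bool.eq_false_iff.mpr hA
      have hf := filter_cons_nonattr l ls hA
      by_cases hV : (PySem.Str.startswith (PySem.Str.strip l) "VERSION "
          || PySem.Str.startswith (PySem.Str.strip l) "BEGIN") = true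
      · -- a VERSION/BEGIN header line (A's first header branch, regardless of in_begin)
        constructor
        · have hstep : aStep (clean, false, false) l =
              (clean, (if PySem.Str.startswith (PySem.Str.strip l) "BEGIN" then true else false), false) := by
            simp only [aStep, hA', hV, Bool.false_eq_true, if_false, if_true]
          rw [hstep, hf]
          by_cases hB : PySem.Str.startswith (PySem.Str.strip l) "BEGIN" = true
          · rw [if_pos hB]
            have hd : altDropHeader (l :: ls.filter (fun x => !altIsAttr x)) =
                altDropHeader (altSkipBlock (ls.filter (fun x => !altIsAttr x))) := by
              rw [altDropHeader]
              simp only [startswith_B_not_V _ hB, Bool.false_eq_true, if_false, hB, if_true]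
            rw [hd]; exact (ih clean).2
          · have hVo : PySem.Str.startswith (PySem.Str.strip l) "VERSION " = true := by
              cases hv : PySem.Str.startswith (PySem.Str.strip l) "VERSION " with
              | true => rfl
              | false => rw [hv, Bool.eq_false_iff.mpr hB] at hV; simp at hV
            have hBf := startswith_V_not_B _ hVo
            rw [if_neg (by rw [hBf]; simp)]
            have hd : altDropHeader (l :: ls.filter (fun x => !altIsAttr x)) =
                altDropHeader (ls.filter (fun x => !altIsAttr x)) := by
              rw [altDropHeader]; simp only [hVo, if_true]
            rw [hd]; exact (ih clean).1
        · -- flag true: A's first branch still fires; B inside the block: l is not "END"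
          have hstep : aStep (clean, true, false) l = (clean, true, false) := by
            simp only [aStep, hA', hV, Bool.false_eq_true, if_false, if_true]
            split <;> rfl
          have hNE : ¬ PySem.Str.strip l = "END" := by
            intro he
            rw [he] at hV
            simp [PySem.Str.startswith] at hV
            revert hV; decide
          rw [hstep, hf]
          have hs : altSkipBlock (l :: ls.filter (fun x => !altIsAttr x)) =
              altSkipBlock (ls.filter (fun x => !altIsAttr x)) := by
            rw [altSkipBlock]; rw [if_neg hNE]
          rw [hs]; exact (ih clean).2
      · have hV' := Bool.eq_false_iff.mpr hV
        have hVv : PySem.Str.startswith (PySem.Str.strip l) "VERSION " = false := by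
          cases hv : PySem.Str.startswith (PySem.Str.strip l) "VERSION " with
          | true => rw [hv] at hV'; simp at hV'
          | false => rfl
        have hVb : PySem.Str.startswith (PySem.Str.strip l) "BEGIN" = false := by
          cases hv : PySem.Str.startswith (PySem.Str.strip l) "BEGIN" with
          | true => rw [hv] at hV'; simp at hV'
          | false => rfl
        constructor
        · -- flag false: blank → skip, content → header done
          by_cases hE : PySem.Str.strip l = ""
          · have hstep : aStep (clean, false, false) l = (clean, false, false) := by
              simp only [aStep, hA', hV', Bool.false_eq_true, if_false, if_true]
              rw [if_neg (by simp [hE] : ¬ PySem.Str.strip l ≠ "")]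
            rw [hstep, hf]
            have hd : altDropHeader (l :: ls.filter (fun x => !altIsAttr x)) =
                altDropHeader (ls.filter (fun x => !altIsAttr x)) := by
              rw [altDropHeader]
              rw [if_neg (by rw [hVv]; simp), if_neg (by rw [hVb]; simp), if_pos hE]
            rw [hd]; exact (ih clean).1
          · have hstep : aStep (clean, false, false) l = (clean ++ [l], false, true) := by
              simp only [aStep, hA', hV', Bool.false_eq_true, if_false, if_true]
              rw [if_pos hE]
            rw [hstep, aStep_done, hf]
            have hd : altDropHeader (l :: ls.filter (fun x => !altIsAttr x)) =
                l :: ls.filter (fun x => !altIsAttr x) := by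
              rw [altDropHeader]
              rw [if_neg (by rw [hVv]; simp), if_neg (by rw [hVb]; simp), if_neg hE]
            rw [hd]; simp
        · -- flag true: END closes the block, anything else is consumed
          by_cases hE : PySem.Str.strip l = "END"
          · have hstep : aStep (clean, true, false) l = (clean, false, false) := by
              simp only [aStep, hA', hV', Bool.false_eq_true, if_false, if_true]
              rw [if_pos hE]
            rw [hstep, hf]
            have hs : altSkipBlock (l :: ls.filter (fun x => !altIsAttr x)) =
                ls.filter (fun x => !altIsAttr x) := by
              rw [altSkipBlock, if_pos hE]
            rw [hs]; exact (ih clean).1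
          · have hstep : aStep (clean, true, false) l = (clean, true, false) := by
              simp only [aStep, hA', hV', Bool.false_eq_true, if_false, if_true]
              rw [if_neg hE]
            rw [hstep, hf]
            have hs : altSkipBlock (l :: ls.filter (fun x => !altIsAttr x)) =
                altSkipBlock (ls.filter (fun x => !altIsAttr x)) := by
              rw [altSkipBlock, if_neg hE]
            rw [hs]; exact (ih clean).2

-- ===== VERDICT (by name: the statement is the Claim_ definition above) =====
theorem strip_metadata_spec : Claim_equal_strip_metadata := by
  intro lines _
  unfold Spec_strip_metadata strip_metadata strip_metadata_alt
  rw [(aStep_main lines []).1]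
  simp
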